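-- pv_equiv track=rewrite | github.com/ananyd36/LeetCode | Number of Subsequences That Satisfy the Given Sum Condition.py | countValidSubsequences
-- ===== SOURCE A (Python) =====
-- def countValidSubsequences(nums, target):
--
--     # First, sort the input array. This allows us to easily find minimum and maximum
--     # values of subsequences by simply considering the ends of the array.
--     nums.sort()
--
--     # Initialize two pointers for the two ends of the array.
--     left, right = 0, len(nums) - 1
--
--     # Initialize a counter to keep track of the number of valid subsequences.
--     count = 0
--
--     # The modulo value as per the problem statement to prevent integer overflow.
--     mod = 10 ** 9 + 7
--
--     # Iterate through the array until the left pointer exceeds the right pointer.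
--     while left <= right:
--         # If the sum of the current minimum and maximum elements is greater than the target,
--         # it means we cannot include the current maximum (right-most element) in our subsequence
--         # because adding any other element will only increase the sum. Thus, we move the right
--         # pointer to the left to try with a smaller maximum value.
--         if nums[left] + nums[right] > target:
--             right -= 1
--         else:
--             # If the current minimum and maximum sum is within the target, all subsets formed
--             # with the current minimum and elements up to the current maximum are valid.
--             # The number of such subsets is 2^(right-left), since for each element between left
--             # and right (inclusive of left, exclusive of right), we can choose to include it or not.
--             # This is why we use the power of 2.
--             #
--             # We use modulus operation to ensure the result stays within the integer limits defined
--             # in the problem statement.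
--             count += pow(2, right - left, mod)
--
--             # Move the left pointer to the right to try with a larger minimum value, since we've
--             # accounted for all valid subsequences with the current minimum.
--             left += 1
--
--     # Return the total count of valid subsequences modulo 10^9 + 7, to ensure the final result
--     # is within the integer limit.
--     return count % mod
-- ===== SOURCE B (Python) =====
-- def countValidSubsequences(nums, target):
--     # B: independent binary search per minimum instead of A's coordinated two-pointer sweep.
--     # Sorts nums in place, like A (same observable mutation).
--     nums.sort()
--     mod = 10 ** 9 + 7
--     n = len(nums)
--     count = 0
--     for i, x in enumerate(nums):
--         # binary search: lo ends as the number of elements <= target - x (bisect_right)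
--         y = target - x
--         lo, hi = 0, n
--         while lo < hi:
--             mid = (lo + hi) // 2
--             if nums[mid] <= y:
--                 lo = mid + 1
--             else:
--                 hi = mid
--         j = lo - 1  # largest index with nums[i] + nums[j] <= target
--         if j >= i:
--             count += pow(2, j - i, mod)
--     return count % mod
-- ===== Notes on version B (the rewrite author's own statement) =====
-- stated objective: alternative
-- what changed: Replaces A's coordinated two-pointer sweep with an independent hand-written binary search per element: for each element taken as the minimum, bisect the sorted list for the largest index j with nums[i]+nums[j] <= target and add 2^(j-i) mod 1e9+7 when j >= i.
import Mathlib
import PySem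

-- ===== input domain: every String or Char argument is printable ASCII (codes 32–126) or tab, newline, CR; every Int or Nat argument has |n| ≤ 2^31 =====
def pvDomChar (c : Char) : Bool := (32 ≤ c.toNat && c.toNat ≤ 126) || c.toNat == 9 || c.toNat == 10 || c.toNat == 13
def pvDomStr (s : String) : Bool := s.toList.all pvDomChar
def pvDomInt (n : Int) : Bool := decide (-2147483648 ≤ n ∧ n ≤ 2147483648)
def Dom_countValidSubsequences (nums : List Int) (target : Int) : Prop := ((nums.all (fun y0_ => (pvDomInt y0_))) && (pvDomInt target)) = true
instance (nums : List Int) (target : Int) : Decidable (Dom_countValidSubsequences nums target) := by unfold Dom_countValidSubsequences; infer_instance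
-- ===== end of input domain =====

-- B replaces A's coordinated two-pointer sweep by an independent per-minimum count (objective:
-- alternative, not faster). In Python both A and B sort the argument list in place; the
-- equivalence proved here is about the return value.

-- ===== PORT A =====
-- the 'while left <= right' loop of A, state (left, right, count)
def pvLoopA (s : List Int) (target modv : Int) (left right count : Int) : Int :=
  if _h : left ≤ right then
    if PySem.List.pyGetD s left 0 + PySem.List.pyGetD s right 0 > target then
      pvLoopA s target modv left (right - 1) count
    else
      pvLoopA s target modv (left + 1) right
        (count + PySem.Int.powMod 2 (right - left).toNat modv)
  else count
termination_by (right - left + 1).toNat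
decreasing_by all_goals omega

def countValidSubsequences (nums : List Int) (target : Int) : Int :=
  let s := PySem.List.sorted nums (fun x => x) false
  let modv : Int := 10 ^ 9 + 7
  PySem.Int.mod (pvLoopA s target modv 0 ((s.length : Int) - 1) 0) modv

-- ===== PORT B =====
-- the inner 'while lo < hi' binary search of B, returning the final lo
def pvBisect (s : List Int) (y lo hi : Int) : Int :=
  if _h : lo < hi then
    let mid := PySem.Int.floordiv (lo + hi) 2
    if PySem.List.pyGetD s mid 0 ≤ y then pvBisect s y (mid + 1) hi
    else pvBisect s y lo mid
  else lo
termination_by (hi - lo).toNat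
decreasing_by
  all_goals
    have hb := PySem.Int.floordiv_two_mid_bounds (le_of_lt _h)
    have hd := PySem.Int.floordiv_mul_add_mod (lo + hi) 2
    have hm := PySem.Int.mod_nonneg (lo + hi) (by norm_num : (0:Int) < 2)
    omega

def countValidSubsequences_alt (nums : List Int) (target : Int) : Int :=
  let s := PySem.List.sorted nums (fun x => x) false
  let modv : Int := 10 ^ 9 + 7
  let count := (PySem.List.enumerate s).foldl (fun count p =>
    let j : Int := pvBisect s (target - p.2) 0 (s.length : Int) - 1
    if j ≥ p.1 then count + PySem.Int.powMod 2 (j - p.1).toNat modv else count) 0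
  PySem.Int.mod count modv

-- ===== PRECONDITION & SPEC =====
def Spec_countValidSubsequences (nums : List Int) (target : Int) (out : Int) : Prop := out = countValidSubsequences_alt nums target
instance (nums : List Int) (target : Int) (out : Int) : Decidable (Spec_countValidSubsequences nums target out) := by unfold Spec_countValidSubsequences; infer_instance

-- ===== CLAIM (what is proved, stated in full; the proofs are below) =====
def Claim_equal_countValidSubsequences : Prop := ∀ (nums : List Int) (target : Int), Dom_countValidSubsequences nums target → Spec_countValidSubsequences nums target (countValidSubsequences nums target)

-- ===== LEMMAS AND PROOFS =====

-- pvJ s target x = (number of elements of s that are ≤ target - x) - 1: on a sorted s this is the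
-- largest index holding a value v with x + v ≤ target, or -1 if there is none (B's 'j')
def pvJ (s : List Int) (target x : Int) : Int :=
  ((s.countP (fun v => decide (v ≤ target - x)) : Int)) - 1

-- the contribution of one index of the sorted list (2^(j-i) mod m if j ≥ i, else 0)
def pvTerm (s : List Int) (target modv : Int) (p : Int × Int) : Int :=
  if pvJ s target p.2 ≥ p.1 then PySem.Int.powMod 2 (pvJ s target p.2 - p.1).toNat modv else 0

-- sum of the contributions of indices l, l+1, …, n-1
def pvTail (s : List Int) (target modv : Int) (l : Nat) : Int :=
  ((List.range' l (s.length - l)).map (fun k : Nat => pvTerm s target modv ((k : Int), s.getD k 0))).sum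

-- on a sorted list, an element is ≤ x exactly when its index is below the count of elements ≤ x
lemma pv_sorted_char (s : List Int) (hs : s.Pairwise (· ≤ ·)) (x : Int) :
    ∀ (k : Nat) (hk : k < s.length), (s[k] ≤ x ↔ k < s.countP (fun v => decide (v ≤ x))) := by
  induction s with
  | nil => intro k hk; simp at hk
  | cons a t ih =>
    rcases List.pairwise_cons.mp hs with ⟨ha, ht⟩
    have IH := ih ht
    intro k hk
    rw [List.countP_cons]
    by_cases hax : a ≤ x
    · simp only [hax, decide_true, if_true]
      cases k with
      | zero => simp only [List.getElem_cons_zero]; constructor <;> intro <;> [omega; exact hax]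
      | succ k =>
        simp only [List.getElem_cons_succ]
        exact (IH k (by simpa using hk)).trans (by omega)
    · have h0 : t.countP (fun v => decide (v ≤ x)) = 0 :=
        List.countP_eq_zero.mpr (fun v hv => by
          simp only [decide_eq_true_eq]; exact fun hvx => hax (le_trans (ha v hv) hvx))
      simp only [hax, decide_false, Bool.false_eq_true, if_false, h0]
      cases k with
      | zero => simp only [List.getElem_cons_zero]; constructor <;> intro h <;> [exact absurd h hax; omega]
      | succ k =>
        have hk' : k < t.length := by simpa using hk
        have htk : a ≤ t[k] := ha _ (List.getElem_mem hk')
        simp only [List.getElem_cons_succ]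
        constructor
        · intro h; exact absurd (le_trans htk h) hax
        · omega

-- bracket: for indices in range, s[i] + s[k] ≤ target ↔ k ≤ pvJ s target s[i]
lemma pv_bracket (s : List Int) (target : Int) (hs : s.Pairwise (· ≤ ·))
    (i k : Nat) (hi : i < s.length) (hk : k < s.length) :
    (s[i] + s[k] ≤ target ↔ (k : Int) ≤ pvJ s target s[i]) := by
  have h := pv_sorted_char s hs (target - s[i]) k hk
  unfold pvJ
  constructor
  · intro hle
    have : k < s.countP (fun v => decide (v ≤ target - s[i])) := h.mp (by omega)
    omega
  · intro hle
    have : s[k] ≤ target - s[i] := h.mpr (by omega)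
    omega

lemma pv_j_mono (s : List Int) (target : Int) (hs : s.Pairwise (· ≤ ·))
    (i k : Nat) (hik : i ≤ k) (hk : k < s.length) :
    pvJ s target s[k] ≤ pvJ s target s[i] := by
  have hi : i < s.length := lt_of_le_of_lt hik hk
  have hle : s[i] ≤ s[k] := by
    rcases Nat.eq_or_lt_of_le hik with h | h
    · simp [h]
    · exact (List.pairwise_iff_getElem.mp hs) i k hi hk h
  unfold pvJ
  have := List.countP_mono_left (l := s)
    (p := fun v => decide (v ≤ target - s[k])) (q := fun v => decide (v ≤ target - s[i]))
    (by intro v _ hv; simp only [decide_eq_true_eq] at *; omega)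
  omega

lemma pv_j_ub (s : List Int) (target x : Int) : pvJ s target x ≤ (s.length : Int) - 1 := by
  unfold pvJ
  have := List.countP_le_length (p := fun v => decide (v ≤ target - x)) (l := s)
  omega

lemma pv_tail_succ (s : List Int) (target modv : Int) (l : Nat) (hl : l < s.length) :
    pvTail s target modv l = pvTerm s target modv ((l : Int), s.getD l 0) + pvTail s target modv (l + 1) := by
  unfold pvTail
  have : s.length - l = (s.length - (l + 1)) + 1 := by omega
  rw [this, List.range'_succ]
  simp

-- the binary search on a sorted list computes the count of elements ≤ y
lemma pv_bisect_eq (s : List Int) (y : Int) (hs : s.Pairwise (· ≤ ·)) :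
    ∀ (lo hi : Int), 0 ≤ lo → hi ≤ (s.length : Int) →
      lo ≤ (s.countP (fun v => decide (v ≤ y)) : Int) →
      (s.countP (fun v => decide (v ≤ y)) : Int) ≤ hi →
      pvBisect s y lo hi = (s.countP (fun v => decide (v ≤ y)) : Int) := by
  intro lo hi
  induction lo, hi using pvBisect.induct s y with
  | case1 lo hi hlt _mid hcond ih =>
    intro h0 hn hlc hch
    set mid := PySem.Int.floordiv (lo + hi) 2 with hmid
    have hb := PySem.Int.floordiv_two_mid_bounds (le_of_lt hlt)
    have hd := PySem.Int.floordiv_mul_add_mod (lo + hi) 2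
    have hm := PySem.Int.mod_nonneg (lo + hi) (by norm_num : (0:Int) < 2)
    rw [← hmid] at hb hd
    have hmn : mid.toNat < s.length := by omega
    have hchar := pv_sorted_char s hs y mid.toNat hmn
    rw [PySem.List.pyGetD_of_nonneg s 0 (by omega), List.getD_eq_getElem s 0 hmn] at hcond
    rw [pvBisect, dif_pos hlt]
    simp only [← hmid]
    rw [if_pos (by rw [PySem.List.pyGetD_of_nonneg s 0 (by omega), List.getD_eq_getElem s 0 hmn]; exact hcond)]
    apply ih (by omega) hn ?_ hch
    have := hchar.mp hcond
    omega
  | case2 lo hi hlt _mid hcond ih =>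
    intro h0 hn hlc hch
    set mid := PySem.Int.floordiv (lo + hi) 2 with hmid
    have hb := PySem.Int.floordiv_two_mid_bounds (le_of_lt hlt)
    have hd := PySem.Int.floordiv_mul_add_mod (lo + hi) 2
    have hm := PySem.Int.mod_nonneg (lo + hi) (by norm_num : (0:Int) < 2)
    rw [← hmid] at hb hd
    have hmn : mid.toNat < s.length := by omega
    have hchar := pv_sorted_char s hs y mid.toNat hmn
    rw [PySem.List.pyGetD_of_nonneg s 0 (by omega), List.getD_eq_getElem s 0 hmn] at hcond
    rw [pvBisect, dif_pos hlt]
    simp only [← hmid]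
    rw [if_neg (by rw [PySem.List.pyGetD_of_nonneg s 0 (by omega), List.getD_eq_getElem s 0 hmn]; exact hcond)]
    apply ih h0 (by omega) hlc ?_
    have : ¬ (mid.toNat < s.countP (fun v => decide (v ≤ y))) := fun hlt' => hcond (hchar.mpr hlt')
    omega
  | case3 lo hi hlt =>
    intro h0 hn hlc hch
    rw [pvBisect, dif_neg hlt]
    omega

-- the two-pointer loop computes the per-index sum of contributions: loop invariant is
-- 'pvJ of the element at left is at most right'
lemma pv_loopA_eq (s : List Int) (target modv : Int) (hs : s.Pairwise (· ≤ ·)) :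
    ∀ (l r c : Int), 0 ≤ l → r ≤ (s.length : Int) - 1 →
      (l < (s.length : Int) → pvJ s target (s.getD l.toNat 0) ≤ r) →
      pvLoopA s target modv l r c = c + pvTail s target modv l.toNat := by
  intro l r c
  induction l, r, c using pvLoopA.induct s target modv with
  | case1 l r c hlr hcond ih =>
    intro hl hr hinv
    have hln : l < (s.length : Int) := by omega
    have hlt : l.toNat < s.length := by omega
    have hrt : r.toNat < s.length := by omega
    rw [pvLoopA, dif_pos hlr, if_pos hcond]
    apply ih hl (by omega)
    intro _
    have hb := pv_bracket s target hs l.toNat r.toNat hlt hrt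
    rw [PySem.List.pyGetD_of_nonneg s 0 hl, PySem.List.pyGetD_of_nonneg s 0 (by omega : (0:Int) ≤ r),
        List.getD_eq_getElem s 0 hlt, List.getD_eq_getElem s 0 hrt] at hcond
    have : ¬ ((r.toNat : Int) ≤ pvJ s target s[l.toNat]) := fun h => by
      have := hb.mpr h; omega
    rw [List.getD_eq_getElem s 0 hlt]
    omega
  | case2 l r c hlr hcond ih =>
    intro hl hr hinv
    have hln : l < (s.length : Int) := by omega
    have hlt : l.toNat < s.length := by omega
    have hrt : r.toNat < s.length := by omega
    rw [pvLoopA, dif_pos hlr, if_neg hcond]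
    rw [PySem.List.pyGetD_of_nonneg s 0 hl, PySem.List.pyGetD_of_nonneg s 0 (by omega : (0:Int) ≤ r),
        List.getD_eq_getElem s 0 hlt, List.getD_eq_getElem s 0 hrt] at hcond
    have hb := pv_bracket s target hs l.toNat r.toNat hlt hrt
    have hinv' := hinv hln
    rw [List.getD_eq_getElem s 0 hlt] at hinv'
    have hjr : pvJ s target s[l.toNat] = r := by
      have := hb.mp (by omega); omega
    rw [ih (by omega) hr ?side]
    case side =>
      intro hl1n
      have hlt1 : (l+1).toNat < s.length := by omega
      rw [List.getD_eq_getElem s 0 hlt1]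
      calc pvJ s target s[(l+1).toNat] ≤ pvJ s target s[l.toNat] := by
              apply pv_j_mono s target hs l.toNat (l+1).toNat (by omega) hlt1
           _ ≤ r := by omega
    rw [pv_tail_succ s target modv l.toNat hlt]
    have hterm : pvTerm s target modv ((l.toNat : Int), s.getD l.toNat 0)
        = PySem.Int.powMod 2 (r - l).toNat modv := by
      unfold pvTerm
      rw [List.getD_eq_getElem s 0 hlt]
      simp only
      rw [hjr]
      rw [if_pos (by omega)]
      congr 1
      omega
    rw [hterm]
    have : (l + 1).toNat = l.toNat + 1 := by omega
    rw [this]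
    ring
  | case3 l r c hlr =>
    intro hl hr hinv
    rw [pvLoopA, dif_neg hlr]
    have : pvTail s target modv l.toNat = 0 := by
      apply List.sum_eq_zero
      intro y hy
      rcases List.mem_map.mp hy with ⟨k, hkmem, rfl⟩
      rcases List.mem_range'_1.mp hkmem with ⟨hk1, hk2⟩
      have hkn : k < s.length := by omega
      have hln : l < (s.length : Int) := by omega
      have hlt : l.toNat < s.length := by omega
      have hinv' := hinv hln
      rw [List.getD_eq_getElem s 0 hlt] at hinv'
      have hmono := pv_j_mono s target hs l.toNat k hk1 hkn
      unfold pvTerm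
      rw [List.getD_eq_getElem s 0 hkn]
      simp only
      rw [if_neg (by omega)]
    rw [this]; ring

-- ===== VERDICT (by name: the statement is the Claim_ definition above) =====
theorem countValidSubsequences_spec : Claim_equal_countValidSubsequences := by
  intro nums target _
  unfold Spec_countValidSubsequences countValidSubsequences countValidSubsequences_alt
  simp only
  set s := PySem.List.sorted nums (fun x => x) false with hsdef
  set M : Int := 10 ^ 9 + 7 with hM
  have hs : s.Pairwise (· ≤ ·) := PySem.List.sorted_pairwise nums (fun x => x)
  -- A side: the two-pointer loop is the per-index sum
  rw [pv_loopA_eq s target M hs 0 ((s.length : Int) - 1) 0 le_rfl le_rfl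
      (fun hn => by
        rw [List.getD_eq_getElem s 0 (by omega : (0:Int).toNat < s.length)]
        exact le_trans (pv_j_ub s target _) (by omega))]
  -- B side: the fold over enumerate is the same per-index sum
  rw [PySem.List.foldl_congr_mem (PySem.List.enumerate s) _
      (fun c p => c + pvTerm s target M p) 0
      (by
        intro acc p _
        simp only
        rw [pv_bisect_eq s (target - p.2) hs 0 (s.length : Int) (le_refl 0) le_rfl
            (by positivity) (by exact_mod_cast List.countP_le_length)]
        unfold pvTerm pvJ
        split_ifs with h1 <;> first | rfl | omega)]
  rw [PySem.List.foldl_add]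
  have hmap : (PySem.List.enumerate s).map (pvTerm s target M)
      = (List.range' 0 (s.length)).map (fun k : Nat => pvTerm s target M ((k : Int), s.getD k 0)) := by
    apply List.ext_getElem
    · simp [PySem.List.length_enumerate]
    · intro i h1 h2
      rw [List.getElem_map, List.getElem_map, PySem.List.getElem_enumerate,
          List.getElem_range'_1]
      have hi : i < s.length := by simpa [PySem.List.length_enumerate] using h1
      simp only [Nat.zero_add]
      rw [List.getD_eq_getElem s 0 hi]
      norm_num
  unfold pvTail
  rw [hmap]
  norm_num
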